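-- pv_equiv track=rewrite | github.com/Daerdemandt/Learning-bioinformatics | LSCM/Solution.py | get_common_substring
-- ===== SOURCE A (Python) =====
-- def is_contained_in(sub, string):
-- 	return (-1 != string.find(sub))
--
-- def get_common_substring(strings, base_string, length):
-- 	if length > len(base_string):
-- 		return ""
-- 	for i in range(1 + len(base_string) - length):
-- 		sub = base_string[i:i+length]
-- 		contained_count = 0
-- 		for string in strings:
-- 			if is_contained_in(sub, string):
-- 				contained_count += 1
-- 			else:
-- 				break
-- 		if contained_count == len(strings):
-- 			return sub
-- 	return ""
-- ===== SOURCE B (Python) =====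
-- def get_common_substring(strings, base_string, length):
--     n = len(base_string)
--     if length <= 0 or length > n:
--         return ""
--
--     def window_sums(s):
--         # rolling sum of each length-`length` window's character codes
--         sums = set()
--         ords = list(map(ord, s))
--         h = 0
--         for j in range(len(ords)):
--             h += ords[j]
--             if j >= length:
--                 h -= ords[j - length]
--             if j >= length - 1:
--                 sums.add(h)
--         return sums
--
--     sum_sets = [window_sums(s) for s in strings]
--     base_ords = list(map(ord, base_string))
--     h = sum(base_ords[:length])
--     for i in range(1 + n - length):
--         if i > 0:
--             h += base_ords[i + length - 1] - base_ords[i - 1]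
--         if all(h in ws for ws in sum_sets):
--             sub = base_string[i:i + length]
--             if all(sub in s for s in strings):
--                 return sub
--     return ""
-- ===== Notes on version B (the rewrite author's own statement) =====
-- stated objective: alternative
-- what changed: B precomputes, per string, the set of rolling character-code sums of its length-L windows and screens each candidate window of base_string by O(1) set membership (confirming a hit with an exact containment check), instead of A's counting loop that re-scans every string with string.find for every candidate; B also returns "" outright for non-positive lengths.
-- intended difference: For negative length where one of the first -length accidental windows base_string[i:len(base)+i+length] is nonempty and contained in every string, A returns that accidental window (a negative-slice artefact); B returns "", the intended answer since no substring of negative length exists. — e.g. on get_common_substring(["ab"], "ab", -1): A returns "a", B returns ""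
import Mathlib
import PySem

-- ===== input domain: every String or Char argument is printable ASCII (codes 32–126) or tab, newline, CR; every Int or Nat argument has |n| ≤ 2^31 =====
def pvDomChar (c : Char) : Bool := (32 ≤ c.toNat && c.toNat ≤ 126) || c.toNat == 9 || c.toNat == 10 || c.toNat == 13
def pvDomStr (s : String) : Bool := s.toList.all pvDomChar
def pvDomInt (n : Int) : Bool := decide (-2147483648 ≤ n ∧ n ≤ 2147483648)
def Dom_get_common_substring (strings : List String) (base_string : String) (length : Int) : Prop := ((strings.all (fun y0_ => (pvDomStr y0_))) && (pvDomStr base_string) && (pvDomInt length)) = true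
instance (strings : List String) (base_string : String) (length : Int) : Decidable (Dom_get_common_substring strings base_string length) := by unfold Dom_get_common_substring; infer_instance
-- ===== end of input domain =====

-- B screens each candidate window by membership of its rolling character-sum in
-- per-string sets of window sums (verifying hits exactly), instead of A's
-- per-candidate find-scan over every string.

-- ===== PORT A =====
def is_contained_in (sub string : String) : Bool := (-1 : Int) != PySem.Str.find string sub

def pvACount (sub : String) : List String → Int → Int
  | [], c => c
  | s :: rest, c => if is_contained_in sub s then pvACount sub rest (c + 1) else c

def pvALoop (strings : List String) (base_string : String) (length : Int) : List Int → String
  | [] => ""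
  | i :: rest =>
    let sub := PySem.Str.slice base_string (some i) (some (i + length))
    if pvACount sub strings 0 = (strings.length : Int) then sub
    else pvALoop strings base_string length rest

def get_common_substring (strings : List String) (base_string : String) (length : Int) : String :=
  if length > PySem.Str.len base_string then ""
  else pvALoop strings base_string length
    (PySem.List.pyRange 0 (1 + PySem.Str.len base_string - length) 1)

-- ===== PORT B =====
def pvOrds (s : String) : List Int := s.toList.map (fun c => (c.toNat : Int))

def pvWSLoop (ords : List Int) (length : Int) : List Int → Int → PySem.Set Int → PySem.Set Int
  | [], _, sums => sums
  | j :: rest, h, sums =>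
    let h1 := h + PySem.List.pyGetD ords j 0
    let h2 := if j ≥ length then h1 - PySem.List.pyGetD ords (j - length) 0 else h1
    let sums1 := if j ≥ length - 1 then PySem.Set.add sums h2 else sums
    pvWSLoop ords length rest h2 sums1

def pvWindowSums (length : Int) (s : String) : PySem.Set Int :=
  pvWSLoop (pvOrds s) length (PySem.List.pyRange 0 (PySem.Str.len s) 1) 0 PySem.Set.empty

def pvBLoop (strings : List String) (sum_sets : List (PySem.Set Int)) (base_ords : List Int)
    (base_string : String) (length : Int) : List Int → Int → String
  | [], _ => ""
  | i :: rest, h =>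
    let h' := if i > 0 then
        h + (PySem.List.pyGetD base_ords (i + length - 1) 0 - PySem.List.pyGetD base_ords (i - 1) 0)
      else h
    if sum_sets.all (fun ws => PySem.Set.contains ws h') then
      let sub := PySem.Str.slice base_string (some i) (some (i + length))
      if strings.all (fun s => PySem.Str.isIn sub s) then sub
      else pvBLoop strings sum_sets base_ords base_string length rest h'
    else pvBLoop strings sum_sets base_ords base_string length rest h'

def get_common_substring_alt (strings : List String) (base_string : String) (length : Int) : String :=
  if length ≤ 0 || length > PySem.Str.len base_string then ""
  else
    pvBLoop strings (strings.map (pvWindowSums length)) (pvOrds base_string) base_string length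
      (PySem.List.pyRange 0 (1 + PySem.Str.len base_string - length) 1)
      (PySem.List.slice (pvOrds base_string) none (some length)).sum

-- ===== PRECONDITION & SPEC =====
-- For negative length, the first -length candidate slices base_string[i:i+length] are accidental
-- nonempty windows of length len(base)+length; if one of them is contained in every string, A
-- returns it, while B returns "" — the intended value, as no substring of negative length exists.
def D_get_common_substring (strings : List String) (base_string : String) (length : Int) : Prop :=
  length < 0 ∧ ∃ i < min (-length).toNat base_string.toList.length,
    (base_string.toList.drop i).take ((base_string.toList.length : Int) + length).toNat ≠ [] ∧
    ∀ s ∈ strings,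
      (base_string.toList.drop i).take ((base_string.toList.length : Int) + length).toNat <:+: s.toList
instance (strings : List String) (base_string : String) (length : Int) : Decidable (D_get_common_substring strings base_string length) := by unfold D_get_common_substring; infer_instance

def Spec_get_common_substring (strings : List String) (base_string : String) (length : Int) (out : String) : Prop := ¬ D_get_common_substring strings base_string length → out = get_common_substring_alt strings base_string length
instance (strings : List String) (base_string : String) (length : Int) (out : String) : Decidable (Spec_get_common_substring strings base_string length out) := by unfold Spec_get_common_substring; infer_instance

def pvDiffWitness_get_common_substring : List String × String × Int := (["ab"], "ab", -1)
def pvDiffWitnessOut_get_common_substring : String × String := ("a", "")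

-- ===== CLAIM (what is proved, stated in full; the proofs are below) =====
def Claim_unchanged_get_common_substring : Prop := ∀ (strings : List String) (base_string : String) (length : Int), Dom_get_common_substring strings base_string length → Spec_get_common_substring strings base_string length (get_common_substring strings base_string length)
def Claim_changed_get_common_substring : Prop := Dom_get_common_substring (pvDiffWitness_get_common_substring.1) (pvDiffWitness_get_common_substring.2.1) (pvDiffWitness_get_common_substring.2.2) ∧ D_get_common_substring (pvDiffWitness_get_common_substring.1) (pvDiffWitness_get_common_substring.2.1) (pvDiffWitness_get_common_substring.2.2) ∧ get_common_substring (pvDiffWitness_get_common_substring.1) (pvDiffWitness_get_common_substring.2.1) (pvDiffWitness_get_common_substring.2.2) = pvDiffWitnessOut_get_common_substring.1 ∧ get_common_substring_alt (pvDiffWitness_get_common_substring.1) (pvDiffWitness_get_common_substring.2.1) (pvDiffWitness_get_common_substring.2.2) = pvDiffWitnessOut_get_common_substring.2 ∧ pvDiffWitnessOut_get_common_substring.1 ≠ pvDiffWitnessOut_get_common_substring.2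
def Claim_exact_get_common_substring : Prop := ∀ (strings : List String) (base_string : String) (length : Int), Dom_get_common_substring strings base_string length → D_get_common_substring strings base_string length → get_common_substring strings base_string length ≠ get_common_substring_alt strings base_string length

-- ===== LEMMAS AND PROOFS =====

-- A's inner loop counts a PREFIX of the strings; it reaches the full length iff all contain sub.
theorem pvACount_eq_iff (sub : String) (ss : List String) (c : Int) :
    pvACount sub ss c = c + ss.length ↔ ∀ s ∈ ss, is_contained_in sub s = true := by
  induction ss generalizing c with
  | nil => simp [pvACount]
  | cons s rest ih =>
    simp only [pvACount, List.mem_cons]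
    split
    · rename_i h
      rw [show c + ((s :: rest).length : Int) = (c + 1) + rest.length by simp only [List.length_cons]; push_cast; omega, ih]
      constructor
      · intro hall t ht
        rcases ht with rfl | ht
        · exact h
        · exact hall t ht
      · intro hall t ht; exact hall t (Or.inr ht)
    · rename_i h
      constructor
      · intro hc; simp only [List.length_cons] at hc; push_cast at hc; omega
      · intro hall; exact absurd (hall s (Or.inl rfl)) h

theorem is_contained_in_iff (sub s : String) :
    is_contained_in sub s = true ↔ sub.toList <:+: s.toList := by
  rw [← PySem.Str.find_ne_neg_one_iff]
  simp only [is_contained_in, bne_iff_ne]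
  exact ne_comm

theorem is_contained_in_empty (s : String) : is_contained_in "" s = true := by
  rw [is_contained_in_iff]; exact List.nil_infix

-- the candidate slice, as drop/take, for 0 ≤ i
theorem slice_toList (base : String) (i L : Int) (hi : 0 ≤ i) (hL : 0 ≤ i + L) :
    (PySem.Str.slice base (some i) (some (i + L))).toList =
      (base.toList.drop i.toNat).take ((i + L).toNat - i.toNat) := by
  simp [PySem.Str.slice, PySem.Chars.slice_eq_listSlice]
  rw [PySem.List.slice_toNat _ hi hL]

-- A's loop returns "" when every successful candidate is itself ""
theorem pvALoop_empty (strings : List String) (base : String) (L : Int) (l : List Int)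
    (h1 : ∀ i ∈ l,
      pvACount (PySem.Str.slice base (some i) (some (i + L))) strings 0 = (strings.length : Int) →
      PySem.Str.slice base (some i) (some (i + L)) = "")
    (h2 : ∃ i ∈ l,
      pvACount (PySem.Str.slice base (some i) (some (i + L))) strings 0 = (strings.length : Int)) :
    pvALoop strings base L l = "" := by
  induction l with
  | nil => rfl
  | cons i rest ih =>
    simp only [pvALoop]
    by_cases hA : pvACount (PySem.Str.slice base (some i) (some (i + L))) strings 0 = (strings.length : Int)
    · rw [if_pos hA]; exact h1 i (List.mem_cons_self ..) hA
    · rw [if_neg hA]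
      rcases h2 with ⟨j, hj, hjA⟩
      rcases List.mem_cons.mp hj with rfl | hj'
      · exact absurd hjA hA
      · exact ih (fun j hj => h1 j (List.mem_cons_of_mem _ hj)) ⟨j, hj', hjA⟩

-- ---- B-side facts: window sums ----
def pvWsum (cs : List Char) : Int := (cs.map (fun c => (c.toNat : Int))).sum

def pvOrdAt (cs : List Char) (k : Nat) : Int := ((cs.getD k ' ').toNat : Int)

theorem pvWsum_cons (c : Char) (cs : List Char) :
    pvWsum (c :: cs) = (c.toNat : Int) + pvWsum cs := by
  simp [pvWsum]

theorem pvWsum_append_singleton (cs : List Char) (c : Char) :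
    pvWsum (cs ++ [c]) = pvWsum cs + (c.toNat : Int) := by
  simp [pvWsum]

theorem pvOrdAt_eq_getElem (cs : List Char) (k : Nat) (hk : k < cs.length) :
    pvOrdAt cs k = ((cs[k]'hk).toNat : Int) := by
  unfold pvOrdAt
  rw [List.getD_eq_getElem cs ' ' hk]

theorem pyGetD_map_ord (cs : List Char) (i : Int) (h0 : 0 ≤ i) (h1 : i.toNat < cs.length) :
    PySem.List.pyGetD (cs.map (fun c => (c.toNat : Int))) i 0 = pvOrdAt cs i.toNat := by
  rw [PySem.List.pyGetD_eq_getElem _ _ h0 (by simp only [List.length_map]; omega),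
    List.getElem_map, pvOrdAt_eq_getElem cs i.toNat h1]

-- the running prefix-window of the rolling loop: the last min t L' characters of cs.take t
def pvPre (cs : List Char) (L' t : Nat) : Int := pvWsum ((cs.drop (t - L')).take (min t L'))

theorem pvPre_eq_take_drop (cs : List Char) (L' t : Nat) :
    pvPre cs L' t = pvWsum ((cs.take t).drop (t - L')) := by
  unfold pvPre
  rw [List.drop_take]
  congr 2
  omega

theorem pvPre_step (cs : List Char) (L' t : Nat) (hL' : 0 < L') (ht : t < cs.length) :
    pvPre cs L' (t + 1) =
      (pvPre cs L' t + pvOrdAt cs t) - (if L' ≤ t then pvOrdAt cs (t - L') else 0) := by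
  rw [pvPre_eq_take_drop, pvPre_eq_take_drop, pvOrdAt_eq_getElem cs t ht]
  have htake : cs.take (t + 1) = cs.take t ++ [cs[t]'ht] := by
    rw [List.take_succ, List.getElem?_eq_getElem ht]
    rfl
  by_cases hc : L' ≤ t
  · rw [if_pos hc, htake, List.drop_append,
      show (t + 1 - L') - (cs.take t).length = 0 by simp only [List.length_take]; omega,
      List.drop_zero]
    have hsplit : (cs.take t).drop (t - L') =
        cs[t - L']'(by omega) :: (cs.take t).drop (t + 1 - L') := by
      rw [List.drop_eq_getElem_cons (by simp only [List.length_take]; omega)]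
      congr 1
      · exact List.getElem_take
      · congr 1
        omega
    rw [hsplit, pvWsum_append_singleton, pvWsum_cons,
      pvOrdAt_eq_getElem cs (t - L') (by omega)]
    ring
  · rw [if_neg hc, htake, show t + 1 - L' = 0 by omega, show t - L' = 0 by omega,
      List.drop_zero, List.drop_zero, pvWsum_append_singleton]
    ring

-- every window sum of s lands in the rolling-loop's set
theorem wsloop_mem (cs : List Char) (L : Int) (hL : 0 < L) :
    ∀ (m t : Nat), t + m = cs.length → ∀ (h : Int) (sums : PySem.Set Int),
      h = pvPre cs L.toNat t →
      (∀ j : Nat, j + L.toNat ≤ t → pvWsum ((cs.drop j).take L.toNat) ∈ sums) →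
      ∀ j : Nat, j + L.toNat ≤ cs.length →
        pvWsum ((cs.drop j).take L.toNat) ∈
          pvWSLoop (cs.map (fun c => (c.toNat : Int))) L
            (PySem.List.pyRange (t : Int) (cs.length : Int) 1) h sums := by
  intro m
  induction m with
  | zero =>
    intro t htm h sums _ hold j hj
    rw [PySem.List.pyRange_one_eq_nil (by omega)]
    exact hold j (by omega)
  | succ m ih =>
    intro t htm h sums hh hold j hj
    rw [PySem.List.pyRange_one_cons (by omega : (t : Int) < (cs.length : Int))]
    simp only [pvWSLoop]
    have harith : (if ((t : Int) ≥ L) then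
          h + PySem.List.pyGetD (cs.map (fun c => (c.toNat : Int))) (t : Int) 0 -
            PySem.List.pyGetD (cs.map (fun c => (c.toNat : Int))) ((t : Int) - L) 0
        else h + PySem.List.pyGetD (cs.map (fun c => (c.toNat : Int))) (t : Int) 0)
        = pvPre cs L.toNat (t + 1) := by
      rw [hh, pvPre_step cs L.toNat t (by omega) (by omega)]
      by_cases hc : L.toNat ≤ t
      · rw [if_pos (show (t : Int) ≥ L by omega), if_pos hc,
          pyGetD_map_ord cs (t : Int) (by omega) (by rw [Int.toNat_natCast]; omega),
          pyGetD_map_ord cs ((t : Int) - L) (by omega) (by omega),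
          Int.toNat_natCast, show ((t : Int) - L).toNat = t - L.toNat by omega]
      · rw [if_neg (show ¬ ((t : Int) ≥ L) by omega), if_neg hc,
          pyGetD_map_ord cs (t : Int) (by omega) (by rw [Int.toNat_natCast]; omega),
          Int.toNat_natCast]
        ring
    rw [harith, show ((t : Int) + 1) = ((t + 1 : Nat) : Int) by push_cast; ring]
    refine ih (t + 1) (by omega) (pvPre cs L.toNat (t + 1)) _ rfl ?_ j hj
    intro j' hj'
    by_cases hlast : j' + L.toNat ≤ t
    · have hmem := hold j' hlast
      split_ifs
      · exact (PySem.Set.mem_add _ _ _).mpr (Or.inl hmem)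
      · exact hmem
    · have hj'eq : j' = t + 1 - L.toNat := by omega
      rw [if_pos (by omega : ((t : Int) ≥ L - 1))]
      refine (PySem.Set.mem_add _ _ _).mpr (Or.inr ?_)
      rw [hj'eq, pvPre_eq_take_drop, List.drop_take,
        show (t + 1) - ((t + 1) - L.toNat) = L.toNat by omega]

theorem mem_pvWindowSums (s : String) (L : Int) (hL : 0 < L) (j : Nat)
    (hj : j + L.toNat ≤ s.toList.length) :
    pvWsum ((s.toList.drop j).take L.toNat) ∈ pvWindowSums L s := by
  unfold pvWindowSums pvOrds
  have h0 : (0 : Int) = ((0 : Nat) : Int) := rfl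
  have hlen : PySem.Str.len s = (s.toList.length : Int) := by simp [PySem.Str.len]
  rw [hlen, h0]
  exact wsloop_mem s.toList L hL s.toList.length 0 (by omega) 0 PySem.Set.empty
    (by simp [pvPre, pvWsum]) (fun j' hj' => absurd hj' (by omega)) j hj

-- an infix of the right length is one of the windows
theorem exists_window_of_infix (cs sub : List Char) (hinf : sub <:+: cs) :
    ∃ j, j + sub.length ≤ cs.length ∧ (cs.drop j).take sub.length = sub := by
  obtain ⟨j, hpre⟩ := (PySem.Chars.exists_prefix_drop_iff_isIn sub cs).mpr
    ((PySem.Chars.isIn_iff_infix sub cs).mpr hinf)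
  by_cases hjle : j ≤ cs.length
  · refine ⟨j, ?_, ?_⟩
    · have := hpre.length_le
      simp only [List.length_drop] at this
      omega
    · rw [List.prefix_iff_eq_take] at hpre
      exact hpre.symm
  · have hnil : sub = [] := List.prefix_nil.mp (by
      rwa [List.drop_eq_nil_of_le (by omega)] at hpre)
    exact ⟨cs.length, by simp [hnil], by simp [hnil]⟩

-- the candidate slice is the window starting at i
theorem sub_toList_window (base : String) (i L : Int) (h0 : 0 ≤ i) (hL : 0 ≤ L) :
    (PySem.Str.slice base (some i) (some (i + L))).toList =
      (base.toList.drop i.toNat).take L.toNat := by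
  rw [slice_toList base i L h0 (by omega)]
  congr 1
  omega

-- rolling one window forward
theorem window_roll (cs : List Char) (L' : Nat) (hL' : 0 < L') (p : Nat) (hp : p + L' < cs.length) :
    pvWsum ((cs.drop (p + 1)).take L') =
      pvWsum ((cs.drop p).take L') + pvOrdAt cs (p + L') - pvOrdAt cs p := by
  obtain ⟨k, rfl⟩ : ∃ k, L' = k + 1 := ⟨L' - 1, by omega⟩
  have h1 : (cs.drop p).take (k + 1) = cs[p]'(by omega) :: (cs.drop (p + 1)).take k := by
    rw [List.drop_eq_getElem_cons (by omega : p < cs.length), List.take_succ_cons]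
  have h2 : (cs.drop (p + 1)).take (k + 1) =
      (cs.drop (p + 1)).take k ++ [cs[p + 1 + k]'(by omega)] := by
    rw [List.take_succ, List.getElem?_eq_getElem (by simp only [List.length_drop]; omega)]
    simp only [Option.toList_some]
    congr 2
    rw [List.getElem_drop]
  rw [h1, h2, pvWsum_cons, pvWsum_append_singleton,
    show pvOrdAt cs (p + (k + 1)) = ((cs[p + 1 + k]'(by omega)).toNat : Int) from by
      rw [show p + (k + 1) = p + 1 + k by omega, pvOrdAt_eq_getElem cs (p + 1 + k) (by omega)],
    pvOrdAt_eq_getElem cs p (by omega)]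
  ring

theorem pvcontains_iff (t : PySem.Set Int) (x : Int) :
    PySem.Set.contains t x = true ↔ x ∈ t := List.contains_iff_mem

-- main loop equivalence for 0 < L ≤ len(base): A's scan and B's rolling scan agree
theorem loops_eq (strings : List String) (base : String) (L : Int) (hL : 0 < L)
    (hLe : L ≤ (base.toList.length : Int)) :
    ∀ (m : Nat) (a h : Int), 0 ≤ a → a + m = 1 + base.toList.length - L →
      h = pvWsum ((base.toList.drop (if a = 0 then 0 else a.toNat - 1)).take L.toNat) →
      pvALoop strings base L (PySem.List.pyRange a (1 + PySem.Str.len base - L) 1) =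
      pvBLoop strings (strings.map (pvWindowSums L)) (pvOrds base) base L
        (PySem.List.pyRange a (1 + PySem.Str.len base - L) 1) h := by
  have hlen : PySem.Str.len base = (base.toList.length : Int) := by simp [PySem.Str.len]
  intro m
  induction m with
  | zero =>
    intro a h ha0 ham _
    rw [hlen]
    rw [PySem.List.pyRange_one_eq_nil (by omega)]
    rfl
  | succ m ih =>
    intro a h ha0 ham hh
    rw [hlen]
    rw [PySem.List.pyRange_one_cons (by omega : a < 1 + (base.toList.length : Int) - L)]
    simp only [pvALoop, pvBLoop]
    have hwin : (if a > 0 then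
          h + (PySem.List.pyGetD (pvOrds base) (a + L - 1) 0 -
            PySem.List.pyGetD (pvOrds base) (a - 1) 0)
        else h) = pvWsum ((base.toList.drop a.toNat).take L.toNat) := by
      by_cases hap : a > 0
      · rw [if_pos hap]
        rw [if_neg (by omega : ¬ a = 0)] at hh
        unfold pvOrds
        have hroll := window_roll base.toList L.toNat (by omega) (a.toNat - 1)
          (by omega : (a.toNat - 1) + L.toNat < base.toList.length)
        rw [show (a.toNat - 1) + 1 = a.toNat by omega] at hroll
        rw [pyGetD_map_ord _ _ (by omega) (by omega : (a + L - 1).toNat < base.toList.length),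
          pyGetD_map_ord _ _ (by omega) (by omega : (a - 1).toNat < base.toList.length), hh,
          show (a + L - 1).toNat = (a.toNat - 1) + L.toNat by omega,
          show (a - 1).toNat = a.toNat - 1 by omega, hroll]
        ring
      · rw [if_neg hap]
        rw [if_pos (by omega : a = 0)] at hh
        rw [hh, show a.toNat = (0 : Nat) by omega]
    rw [hwin]
    have hsub : (PySem.Str.slice base (some a) (some (a + L))).toList =
        (base.toList.drop a.toNat).take L.toNat := sub_toList_window base a L ha0 (by omega)
    have hsublen : (PySem.Str.slice base (some a) (some (a + L))).toList.length = L.toNat := by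
      rw [hsub]
      simp only [List.length_take, List.length_drop]
      omega
    have hrec := ih (a + 1) (pvWsum ((base.toList.drop a.toNat).take L.toNat)) (by omega)
      (by omega) (by rw [if_neg (by omega : ¬ a + 1 = 0)]; congr 3; omega)
    rw [hlen] at hrec
    by_cases hac : ∀ s ∈ strings, (PySem.Str.slice base (some a) (some (a + L))).toList <:+: s.toList
    · have hA : pvACount (PySem.Str.slice base (some a) (some (a + L))) strings 0 =
          (strings.length : Int) := by
        rw [show ((strings.length : Int)) = 0 + strings.length by omega, pvACount_eq_iff]
        intro s hs
        rw [is_contained_in_iff]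
        exact hac s hs
      rw [if_pos hA]
      have houter : (strings.map (pvWindowSums L)).all
          (fun ws => PySem.Set.contains ws (pvWsum ((base.toList.drop a.toNat).take L.toNat))) = true := by
        rw [List.all_map, List.all_eq_true]
        intro s hs
        simp only [Function.comp]
        rw [pvcontains_iff]
        obtain ⟨j, hj, hwj⟩ := exists_window_of_infix s.toList _ (hac s hs)
        rw [hsublen] at hj hwj
        have heq : (base.toList.drop a.toNat).take L.toNat = (s.toList.drop j).take L.toNat := by
          rw [hwj, hsub]
        rw [heq]
        exact mem_pvWindowSums s L hL j hj
      rw [if_pos houter]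
      have hinner : strings.all
          (fun s => PySem.Str.isIn (PySem.Str.slice base (some a) (some (a + L))) s) = true := by
        rw [List.all_eq_true]
        intro s hs
        rw [PySem.Str.isIn_iff_infix]
        exact hac s hs
      rw [if_pos hinner]
    · have hA : ¬ (pvACount (PySem.Str.slice base (some a) (some (a + L))) strings 0 =
          (strings.length : Int)) := by
        rw [show ((strings.length : Int)) = 0 + strings.length by omega, pvACount_eq_iff]
        intro hall
        apply hac
        intro s hs
        rw [← is_contained_in_iff]
        exact hall s hs
      rw [if_neg hA]
      by_cases houter : (strings.map (pvWindowSums L)).all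
          (fun ws => PySem.Set.contains ws (pvWsum ((base.toList.drop a.toNat).take L.toNat))) = true
      · rw [if_pos houter]
        have hinner : ¬ (strings.all
            (fun s => PySem.Str.isIn (PySem.Str.slice base (some a) (some (a + L))) s) = true) := by
          rw [List.all_eq_true]
          intro hall
          apply hac
          intro s hs
          rw [← PySem.Str.isIn_iff_infix]
          exact hall s hs
        rw [if_neg hinner]
        exact hrec
      · rw [if_neg houter]
        exact hrec

-- empty-sub containment count is full
theorem pvACount_empty_full (strings : List String) :
    pvACount "" strings 0 = (strings.length : Int) := by
  rw [show ((strings.length : Int)) = 0 + strings.length by omega, pvACount_eq_iff]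
  intro s _; exact is_contained_in_empty s

theorem slice_empty_of_ge (base : String) (i L : Int) (hi : 0 ≤ i + L) (hle : i + L ≤ i) (h0 : 0 ≤ i) :
    PySem.Str.slice base (some i) (some (i + L)) = "" := by
  rw [← String.toList_inj, slice_toList base i L h0 hi]
  simp [List.take_eq_nil_iff]
  omega

-- for a negative stop, the slice is the accidental window described by D_
theorem slice_neg_toList (base : String) (i L : Int) (h0 : 0 ≤ i) (hneg : i + L < 0) :
    (PySem.Str.slice base (some i) (some (i + L))).toList =
      (base.toList.drop i.toNat).take ((base.toList.length : Int) + L).toNat := by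
  simp only [PySem.Str.slice, String.toList_ofList, PySem.Chars.slice_eq_listSlice]
  unfold PySem.List.slice
  simp only [PySem.List.clampIdx, if_pos hneg, if_neg (by omega : ¬ i < 0)]
  by_cases hlen : i.toNat ≤ base.toList.length
  · rw [min_eq_left hlen]
    congr 1
    split_ifs with hc <;> omega
  · rw [min_eq_right (by omega), List.drop_length,
        List.drop_eq_nil_of_le (by omega), List.take_nil, List.take_nil]

-- inside D_'s region every candidate before the witness is nonempty; the loop's first
-- success therefore returns a nonempty slice
theorem pvALoop_append (strings : List String) (base : String) (L : Int) (l1 l2 : List Int)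
    (h : ∃ i ∈ l1,
      pvACount (PySem.Str.slice base (some i) (some (i + L))) strings 0 = (strings.length : Int)) :
    pvALoop strings base L (l1 ++ l2) = pvALoop strings base L l1 := by
  induction l1 with
  | nil => simp at h
  | cons i rest ih =>
    simp only [List.cons_append, pvALoop]
    by_cases hA : pvACount (PySem.Str.slice base (some i) (some (i + L))) strings 0 = (strings.length : Int)
    · rw [if_pos hA, if_pos hA]
    · rw [if_neg hA, if_neg hA]
      rcases h with ⟨j, hj, hjA⟩
      rcases List.mem_cons.mp hj with rfl | hj'
      · exact absurd hjA hA
      · exact ih ⟨j, hj', hjA⟩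

theorem pvALoop_ne_empty (strings : List String) (base : String) (L : Int) (l : List Int)
    (h1 : ∀ i ∈ l, PySem.Str.slice base (some i) (some (i + L)) ≠ "")
    (h2 : ∃ i ∈ l,
      pvACount (PySem.Str.slice base (some i) (some (i + L))) strings 0 = (strings.length : Int)) :
    pvALoop strings base L l ≠ "" := by
  induction l with
  | nil => simp at h2
  | cons i rest ih =>
    simp only [pvALoop]
    by_cases hA : pvACount (PySem.Str.slice base (some i) (some (i + L))) strings 0 = (strings.length : Int)
    · rw [if_pos hA]; exact h1 i (List.mem_cons_self ..)
    · rw [if_neg hA]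
      rcases h2 with ⟨j, hj, hjA⟩
      rcases List.mem_cons.mp hj with rfl | hj'
      · exact absurd hjA hA
      · exact ih (fun j hj => h1 j (List.mem_cons_of_mem _ hj)) ⟨j, hj', hjA⟩

-- ===== VERDICT (by name: the statement is the Claim_ definition above) =====
theorem get_common_substring_spec : Claim_unchanged_get_common_substring := by
  intro strings base L _ hnD
  unfold get_common_substring get_common_substring_alt
  by_cases hgt : L > PySem.Str.len base
  · rw [if_pos hgt, if_pos (by simp only [Bool.or_eq_true, decide_eq_true_eq]; right; exact hgt)]
  · rw [if_neg hgt]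
    have hlenbase : PySem.Str.len base = (base.toList.length : Int) := by simp [PySem.Str.len]
    rw [hlenbase] at hgt
    by_cases hpos : 0 < L
    · rw [if_neg (by rw [hlenbase]; simp only [Bool.or_eq_true, decide_eq_true_eq]; omega)]
      exact loops_eq strings base L hpos (by omega) (1 + base.toList.length - L).toNat 0
        ((PySem.List.slice (pvOrds base) none (some L)).sum) le_rfl (by omega)
        (by rw [if_pos rfl, List.drop_zero, PySem.List.slice_to _ (by omega : (0:Int) ≤ L)]
            unfold pvOrds
            rw [← List.map_take]
            simp [pvWsum])
    · rw [if_pos (by simp only [Bool.or_eq_true, decide_eq_true_eq]; omega)]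
      apply pvALoop_empty
      · intro i hi htest
        obtain ⟨hi0, _⟩ := PySem.List.mem_pyRange_one.mp hi
        by_cases hnn : 0 ≤ i + L
        · exact slice_empty_of_ge base i L hnn (by omega) hi0
        · by_contra hne
          have hne' : (base.toList.drop i.toNat).take ((base.toList.length : Int) + L).toNat ≠ [] := by
            intro h
            apply hne
            rw [← String.toList_inj, slice_neg_toList base i L hi0 (by omega), h]
            simp
          have hidx : i.toNat < base.toList.length := by
            by_contra hge
            exact hne' (by rw [List.drop_eq_nil_of_le (by omega), List.take_nil])
          apply hnD
          refine ⟨by omega, i.toNat, by omega, hne', ?_⟩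
          · intro s hs
            rw [← slice_neg_toList base i L hi0 (by omega)]
            rw [show ((strings.length : Int)) = 0 + strings.length by omega, pvACount_eq_iff] at htest
            have := htest s hs
            rw [is_contained_in_iff] at this
            exact this
      · refine ⟨-L, ?_, ?_⟩
        · rw [PySem.List.mem_pyRange_one, hlenbase]
          constructor <;> omega
        · rw [slice_empty_of_ge base (-L) L (by omega) (by omega) (by omega)]
          exact pvACount_empty_full strings

theorem get_common_substring_changed : Claim_changed_get_common_substring := by
  unfold Claim_changed_get_common_substring; decide

theorem get_common_substring_tight : Claim_exact_get_common_substring := by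
  intro strings base L _ hD
  obtain ⟨hL, i0, hi0lt, hwne, hwall⟩ := hD
  have hlenbase : PySem.Str.len base = (base.toList.length : Int) := by simp [PySem.Str.len]
  have hi0len : i0 < base.toList.length ∧ 0 < ((base.toList.length : Int) + L).toNat := by
    constructor
    · by_contra h
      exact hwne (by rw [List.drop_eq_nil_of_le (by omega), List.take_nil])
    · by_contra h
      exact hwne (by rw [show ((base.toList.length : Int) + L).toNat = 0 by omega, List.take_zero])
  -- B returns ""
  have hB : get_common_substring_alt strings base L = "" := by
    unfold get_common_substring_alt
    rw [if_pos (by simp only [Bool.or_eq_true, decide_eq_true_eq]; omega)]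
  rw [hB]
  -- A's loop: split the range after the witness index
  unfold get_common_substring
  rw [if_neg (by rw [hlenbase]; omega), PySem.List.pyRange_one_append 0 ((i0 : Int) + 1)
    (1 + PySem.Str.len base - L) (by omega) (by rw [hlenbase]; omega)]
  have htest : pvACount (PySem.Str.slice base (some (i0 : Int)) (some ((i0 : Int) + L))) strings 0
      = (strings.length : Int) := by
    rw [show ((strings.length : Int)) = 0 + strings.length by omega, pvACount_eq_iff]
    intro s hs
    rw [is_contained_in_iff, slice_neg_toList base (i0 : Int) L (by omega) (by omega)]
    simpa using hwall s hs
  rw [pvALoop_append strings base L _ _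
    ⟨(i0 : Int), by rw [PySem.List.mem_pyRange_one]; omega, htest⟩]
  apply pvALoop_ne_empty
  · intro i hi
    obtain ⟨hi0', hilt⟩ := PySem.List.mem_pyRange_one.mp hi
    rw [Ne, ← String.toList_inj, slice_neg_toList base i L hi0' (by omega)]
    simp only [String.toList_empty]
    intro h
    rw [List.take_eq_nil_iff] at h
    rcases h with h | h
    · omega
    · rw [List.drop_eq_nil_iff] at h
      omega
  · exact ⟨(i0 : Int), by rw [PySem.List.mem_pyRange_one]; omega, htest⟩
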